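-- pv_equiv track=rewrite | github.com/joshmhc/rna-folding | RNA_folding.py | pairs_to_stems
-- ===== SOURCE A (Python) =====
-- def pairs_to_stems(selected_pairs):
--
--     """Group selected base pairs (i,j) into contiguous stems.
--
--     Args:
--         selected_pairs (Iterable[Tuple[int,int]]): Set/list of chosen base pairs (i<j).
--
--     Returns:
--         list: List of stems as 4-tuples (i_start, i_end, j_start, j_end).
--     """
--     pair_set = set(selected_pairs)
--     used = set()
--     stems = []
--
--     for (i, j) in sorted(pair_set):
--         if (i, j) in used:
--             continue
--
--         # Extend outward to get outermost pair of this stack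
--         si, sj = i, j
--         while (si - 1, sj + 1) in pair_set:
--             si -= 1
--             sj += 1
--
--         # Extend inward to get innermost pair
--         ei, ej = i, j
--         while (ei + 1, ej - 1) in pair_set:
--             ei += 1
--             ej -= 1
--
--         # Mark all pairs in this stem as used
--         for t in range(ei - si + 1):
--             used.add((si + t, sj - t))
--
--         # Save as (min_i, max_i, min_j, max_j)
--         stems.append((si, ei, ej, sj))
--
--     return stems
-- ===== SOURCE B (Python) =====
-- def pairs_to_stems(selected_pairs):
--     """Group selected base pairs (i,j) into contiguous stems.
--
--     Simpler: find each stem's outermost pair (its "head") directly, then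
--     extend inward once per stem; no `used` bookkeeping, no outward loop.
--     """
--     pair_set = set(selected_pairs)
--     stems = []
--     for (si, sj) in sorted(p for p in pair_set if (p[0] - 1, p[1] + 1) not in pair_set):
--         ei, ej = si, sj
--         while (ei + 1, ej - 1) in pair_set:
--             ei += 1
--             ej -= 1
--         stems.append((si, ei, ej, sj))
--     return stems
-- ===== Notes on version B (the rewrite author's own statement) =====
-- stated objective: simpler
-- what changed: B drops A's `used`-set bookkeeping and the outward-extension loop entirely: it directly collects each stem's outermost pair (a pair whose outward neighbour (i-1,j+1) is not in the set), sorts those heads, and extends each head inward once.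
import Mathlib
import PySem

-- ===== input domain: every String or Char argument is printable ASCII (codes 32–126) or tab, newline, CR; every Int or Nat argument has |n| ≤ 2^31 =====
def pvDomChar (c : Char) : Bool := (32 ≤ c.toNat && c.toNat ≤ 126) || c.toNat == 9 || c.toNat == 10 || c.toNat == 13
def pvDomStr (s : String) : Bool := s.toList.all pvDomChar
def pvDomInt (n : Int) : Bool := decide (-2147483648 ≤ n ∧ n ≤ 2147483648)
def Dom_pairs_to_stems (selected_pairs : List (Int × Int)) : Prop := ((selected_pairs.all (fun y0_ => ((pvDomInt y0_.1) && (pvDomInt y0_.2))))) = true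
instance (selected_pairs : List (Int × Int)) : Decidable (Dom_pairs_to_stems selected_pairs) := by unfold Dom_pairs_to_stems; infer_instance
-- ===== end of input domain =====

-- B is a simpler same-cost re-grouping: it collects and sorts the stem heads and extends each inward once,
-- with no `used` set and no outward loop; proved to return exactly A's value on every input.

-- ===== PORT A =====
-- the `while (si-1, sj+1) in pair_set` loop; the fuel `S.length + 1` is only a termination
-- guard (the walk visits distinct members of S, so it can never take that many steps)
def pvOut (S : PySem.Set (Int × Int)) : Nat → Int × Int → Int × Int
  | 0, ij => ij
  | fuel+1, ij =>
      if PySem.Set.contains S (ij.1 - 1, ij.2 + 1) then pvOut S fuel (ij.1 - 1, ij.2 + 1) else ij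

-- the `while (ei+1, ej-1) in pair_set` loop (same fuel guard); B's Python has this same loop,
-- so the helper is shared by both ports
def pvInw (S : PySem.Set (Int × Int)) : Nat → Int × Int → Int × Int
  | 0, ij => ij
  | fuel+1, ij =>
      if PySem.Set.contains S (ij.1 + 1, ij.2 - 1) then pvInw S fuel (ij.1 + 1, ij.2 - 1) else ij

-- one iteration of A's `for (i, j) in sorted(pair_set)` loop, state = (used, stems)
def pvStepA (S : PySem.Set (Int × Int))
    (st : PySem.Set (Int × Int) × List (Int × Int × Int × Int)) (p : Int × Int) :
    PySem.Set (Int × Int) × List (Int × Int × Int × Int) :=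
  if PySem.Set.contains st.1 p then st
  else
    let s := pvOut S (S.length + 1) p
    let e := pvInw S (S.length + 1) p
    ((PySem.List.pyRange 0 (e.1 - s.1 + 1) 1).foldl
        (fun u t => PySem.Set.add u (s.1 + t, s.2 - t)) st.1,
     st.2 ++ [(s.1, e.1, e.2, s.2)])

def pairs_to_stems (selected_pairs : List (Int × Int)) : List (Int × Int × Int × Int) :=
  let pair_set := PySem.Set.ofList selected_pairs
  ((PySem.List.sorted2 pair_set (fun p => p.1) (fun p => p.2)).foldl (pvStepA pair_set)
      ((PySem.Set.empty : PySem.Set (Int × Int)), [])).2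

-- ===== PORT B =====
def pairs_to_stems_alt (selected_pairs : List (Int × Int)) : List (Int × Int × Int × Int) :=
  let pair_set := PySem.Set.ofList selected_pairs
  (PySem.List.sorted2
      (pair_set.filter (fun p => !(PySem.Set.contains pair_set (p.1 - 1, p.2 + 1))))
      (fun p => p.1) (fun p => p.2)).map
    (fun p =>
      let e := pvInw pair_set (pair_set.length + 1) p
      (p.1, e.1, e.2, p.2))

-- ===== PRECONDITION & SPEC =====
def Spec_pairs_to_stems (selected_pairs : List (Int × Int)) (out : List (Int × Int × Int × Int)) : Prop := out = pairs_to_stems_alt selected_pairs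
instance (selected_pairs : List (Int × Int)) (out : List (Int × Int × Int × Int)) : Decidable (Spec_pairs_to_stems selected_pairs out) := by unfold Spec_pairs_to_stems; infer_instance

-- ===== CLAIM (what is proved, stated in full; the proofs are below) =====
def Claim_equal_pairs_to_stems : Prop := ∀ (selected_pairs : List (Int × Int)), Dom_pairs_to_stems selected_pairs → Spec_pairs_to_stems selected_pairs (pairs_to_stems selected_pairs)

-- ===== LEMMAS AND PROOFS =====

-- strict lexicographic order on pairs (Python's tuple `<`), and its reflexive negation
def pvLexLt (p q : Int × Int) : Prop := p.1 < q.1 ∨ (p.1 = q.1 ∧ p.2 < q.2)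
def pvLexLe (p q : Int × Int) : Prop := ¬ pvLexLt q p

-- forward ("inward") and backward ("outward") chain from a pair
def pvCF (p : Int × Int) (t : Nat) : Int × Int := (p.1 + (t : Int), p.2 - (t : Int))
def pvCB (p : Int × Int) (t : Nat) : Int × Int := (p.1 - (t : Int), p.2 + (t : Int))

-- p is the outermost pair of its stem
def pvHd (S : PySem.Set (Int × Int)) (p : Int × Int) : Bool :=
  !(PySem.Set.contains S (p.1 - 1, p.2 + 1))

-- q belongs to the inward chain of h (every step of the path lies in S)
def pvStem (S : PySem.Set (Int × Int)) (h q : Int × Int) : Prop :=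
  ∃ k : Nat, q = pvCF h k ∧ ∀ t : Nat, 1 ≤ t → t ≤ k → pvCF h t ∈ S

-- the 4-tuple both programs emit for a head p
def pvStemFn (S : PySem.Set (Int × Int)) (p : Int × Int) : Int × Int × Int × Int :=
  (p.1, (pvInw S (S.length + 1) p).1, (pvInw S (S.length + 1) p).2, p.2)

lemma pvLexLt_irrefl (a : Int × Int) : ¬ pvLexLt a a := by
  simp [pvLexLt]

lemma pvLexLt_asymm {a b : Int × Int} (h : pvLexLt a b) : ¬ pvLexLt b a := by
  obtain ⟨a1, a2⟩ := a; obtain ⟨b1, b2⟩ := b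
  simp [pvLexLt] at *; omega

lemma pvLexLt_total {a b : Int × Int} (h1 : ¬ pvLexLt a b) (h2 : ¬ pvLexLt b a) : a = b := by
  obtain ⟨a1, a2⟩ := a; obtain ⟨b1, b2⟩ := b
  simp [pvLexLt, Prod.ext_iff] at *; omega

lemma pvLexLt_trans {a b c : Int × Int} (h1 : pvLexLt a b) (h2 : pvLexLt b c) : pvLexLt a c := by
  obtain ⟨a1, a2⟩ := a; obtain ⟨b1, b2⟩ := b; obtain ⟨c1, c2⟩ := c
  simp [pvLexLt] at *; omega

lemma pvInsertBy_cons (bf : (Int × Int) → (Int × Int) → Bool) (x y : Int × Int) (ys : List (Int × Int)) :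
    PySem.List.insertBy bf x (y :: ys) =
      if bf x y then x :: y :: ys else y :: PySem.List.insertBy bf x ys := rfl

lemma pvPw_insertBy (bf : (Int × Int) → (Int × Int) → Bool)
    (hbf : ∀ a b, bf a b = true ↔ pvLexLt a b) (x : Int × Int) :
    ∀ (l : List (Int × Int)), l.Pairwise pvLexLe → (PySem.List.insertBy bf x l).Pairwise pvLexLe
  | [], _ => by simp [PySem.List.insertBy]
  | y :: ys, h => by
    rw [pvInsertBy_cons]
    rcases List.pairwise_cons.mp h with ⟨hy, hys⟩
    by_cases hxy : bf x y = true
    · rw [if_pos hxy]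
      have hlt : pvLexLt x y := (hbf x y).mp hxy
      refine List.pairwise_cons.mpr ⟨?_, h⟩
      intro z hz
      rcases List.mem_cons.mp hz with rfl | hz'
      · exact pvLexLt_asymm hlt
      · intro hzx
        exact hy z hz' (pvLexLt_trans hzx hlt)
    · rw [if_neg hxy]
      refine List.pairwise_cons.mpr ⟨?_, pvPw_insertBy bf hbf x ys hys⟩
      intro z hz
      rcases (PySem.List.mem_insertBy bf x z ys).mp hz with rfl | hz'
      · intro hlt; exact hxy ((hbf z y).mpr hlt)
      · exact hy z hz'

lemma pvPw_foldl (bf : (Int × Int) → (Int × Int) → Bool)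
    (hbf : ∀ a b, bf a b = true ↔ pvLexLt a b) :
    ∀ (l acc : List (Int × Int)), acc.Pairwise pvLexLe →
      (l.foldl (fun a x => PySem.List.insertBy bf x a) acc).Pairwise pvLexLe
  | [], acc, h => h
  | x :: xs, acc, h => by
    rw [List.foldl_cons]
    exact pvPw_foldl bf hbf xs _ (pvPw_insertBy bf hbf x acc h)

lemma pvHbf : ∀ a b : Int × Int,
    (decide (a.1 < b.1) || (!decide (b.1 < a.1) && decide (a.2 < b.2))) = true ↔ pvLexLt a b := by
  intro a b; simp [pvLexLt]; omega

lemma pvPw_sorted2 (xs : List (Int × Int)) :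
    (PySem.List.sorted2 xs (fun p => p.1) (fun p => p.2)).Pairwise pvLexLe := by
  show (xs.foldl (fun acc x =>
      PySem.List.insertBy (fun a b => decide (a.1 < b.1) || (!decide (b.1 < a.1) && decide (a.2 < b.2))) x acc)
      []).Pairwise pvLexLe
  exact pvPw_foldl _ pvHbf xs [] (by simp)

lemma pvSorted2_eq (xs ys : List (Int × Int)) (hperm : ys.Perm xs) (hpw : ys.Pairwise pvLexLt) :
    PySem.List.sorted2 xs (fun p => p.1) (fun p => p.2) = ys := by
  have hanti : ∀ (a b : Int × Int),
      a ∈ PySem.List.sorted2 xs (fun p => p.1) (fun p => p.2) → b ∈ ys →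
        pvLexLe a b → pvLexLe b a → a = b :=
    fun a b _ _ h1 h2 => pvLexLt_total h2 h1
  exact ((PySem.List.sorted2_perm xs _ _ false).trans hperm.symm).eq_of_pairwise hanti
    (pvPw_sorted2 xs) (hpw.imp (fun h => pvLexLt_asymm h))

lemma pvPairwise_lt_of_le_nodup (xs : List (Int × Int)) (h1 : xs.Pairwise pvLexLe)
    (h2 : xs.Nodup) : xs.Pairwise pvLexLt := by
  refine (h1.and h2).imp ?_
  rintro a b ⟨hle, hne⟩
  by_cases h : pvLexLt a b
  · exact h
  · exact absurd (pvLexLt_total h hle) hne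

lemma pvCF_zero (p : Int × Int) : pvCF p 0 = p := by
  obtain ⟨a, b⟩ := p; simp [pvCF]

lemma pvCB_zero (p : Int × Int) : pvCB p 0 = p := by
  obtain ⟨a, b⟩ := p; simp [pvCB]

lemma pvCF_shift (p : Int × Int) (t : Nat) : pvCF (p.1 + 1, p.2 - 1) t = pvCF p (t + 1) := by
  simp [pvCF, Prod.ext_iff]; omega

lemma pvCB_shift (p : Int × Int) (t : Nat) : pvCB (p.1 - 1, p.2 + 1) t = pvCB p (t + 1) := by
  simp [pvCB, Prod.ext_iff]; omega

lemma pvCF_back (h : Int × Int) (k : Nat) (hk : 1 ≤ k) :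
    ((pvCF h k).1 - 1, (pvCF h k).2 + 1) = pvCF h (k - 1) := by
  simp [pvCF, Prod.ext_iff]; omega

lemma pvCF_pvCB (p : Int × Int) (m : Nat) : pvCF (pvCB p m) m = p := by
  obtain ⟨a, b⟩ := p; simp [pvCF, pvCB]

lemma pvCF_pvCB_sub (p : Int × Int) (m t : Nat) (ht : t ≤ m) :
    pvCF (pvCB p m) t = pvCB p (m - t) := by
  simp [pvCF, pvCB, Prod.ext_iff]; omega

lemma pvCB_one (p : Int × Int) : pvCB p 1 = (p.1 - 1, p.2 + 1) := by
  simp [pvCB]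

lemma pvCB_back (p : Int × Int) (m : Nat) :
    ((pvCB p m).1 - 1, (pvCB p m).2 + 1) = pvCB p (m + 1) := by
  simp [pvCB, Prod.ext_iff]; omega

lemma pvContains_false_iff (s : PySem.Set (Int × Int)) (x : Int × Int) :
    PySem.Set.contains s x = false ↔ x ∉ s := by
  constructor
  · intro h hx
    rw [(PySem.Set.contains_iff s x).mpr hx] at h; cases h
  · intro hx
    cases hc : PySem.Set.contains s x
    · rfl
    · exact absurd ((PySem.Set.contains_iff s x).mp hc) hx

lemma pvInw_succ (S : PySem.Set (Int × Int)) (f : Nat) (p : Int × Int) :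
    pvInw S (f + 1) p =
      if PySem.Set.contains S (p.1 + 1, p.2 - 1) then pvInw S f (p.1 + 1, p.2 - 1) else p := rfl

lemma pvOut_succ (S : PySem.Set (Int × Int)) (f : Nat) (p : Int × Int) :
    pvOut S (f + 1) p =
      if PySem.Set.contains S (p.1 - 1, p.2 + 1) then pvOut S f (p.1 - 1, p.2 + 1) else p := rfl

lemma pvChain_count (S : List (Int × Int)) (_hS : S.Nodup) (g : Nat → Int × Int)
    (hinj : ∀ a b, (g a).1 = (g b).1 → a = b) (n : Nat) (h : ∀ t, t < n → g t ∈ S) :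
    n ≤ S.length := by
  have hnd : ((List.range n).map g).Nodup :=
    (List.nodup_range).map (fun a b hab => hinj a b (congrArg Prod.fst hab))
  have hsub : (List.range n).map g ⊆ S := by
    intro x hx
    rcases List.mem_map.mp hx with ⟨t, ht, rfl⟩
    exact h t (List.mem_range.mp ht)
  have := (List.subperm_of_subset hnd hsub).length_le
  simpa using this

lemma pvInw_cases (S : PySem.Set (Int × Int)) :
    ∀ (fuel : Nat) (p : Int × Int),
      (∃ m : Nat, m ≤ fuel ∧ pvInw S fuel p = pvCF p m ∧
        (∀ t, 1 ≤ t → t ≤ m → pvCF p t ∈ S) ∧ pvCF p (m + 1) ∉ S)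
      ∨ (∀ t, 1 ≤ t → t ≤ fuel → pvCF p t ∈ S)
  | 0, p => Or.inr (by omega)
  | fuel + 1, p => by
    rw [pvInw_succ]
    by_cases hc : PySem.Set.contains S (p.1 + 1, p.2 - 1) = true
    · rw [if_pos hc]
      have h1 : pvCF p 1 ∈ S := by
        have := (PySem.Set.contains_iff S _).mp hc
        simpa [pvCF] using this
      rcases pvInw_cases S fuel (p.1 + 1, p.2 - 1) with ⟨m, hm, heq, hpath, hstop⟩ | hall
      · left
        refine ⟨m + 1, by omega, by rw [heq, pvCF_shift], ?_, ?_⟩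
        · intro t h1t htm
          rcases Nat.exists_eq_add_of_le h1t with ⟨k, rfl⟩
          rcases Nat.eq_zero_or_pos k with rfl | hk
          · simpa using h1
          · have := hpath k (by omega) (by omega)
            rw [pvCF_shift] at this
            rwa [Nat.add_comm 1 k]
        · rw [← pvCF_shift]; exact hstop
      · right
        intro t h1t htf
        rcases Nat.exists_eq_add_of_le h1t with ⟨k, rfl⟩
        rcases Nat.eq_zero_or_pos k with rfl | hk
        · simpa using h1
        · have := hall k (by omega) (by omega)
          rw [pvCF_shift] at this
          rwa [Nat.add_comm 1 k]
    · rw [if_neg hc]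
      left
      refine ⟨0, by omega, (pvCF_zero p).symm, by omega, ?_⟩
      intro hmem
      exact (pvContains_false_iff S _).mp (Bool.eq_false_iff.mpr hc)
        (by simpa [pvCF] using hmem)

lemma pvOut_cases (S : PySem.Set (Int × Int)) :
    ∀ (fuel : Nat) (p : Int × Int),
      (∃ m : Nat, m ≤ fuel ∧ pvOut S fuel p = pvCB p m ∧
        (∀ t, 1 ≤ t → t ≤ m → pvCB p t ∈ S) ∧ pvCB p (m + 1) ∉ S)
      ∨ (∀ t, 1 ≤ t → t ≤ fuel → pvCB p t ∈ S)
  | 0, p => Or.inr (by omega)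
  | fuel + 1, p => by
    rw [pvOut_succ]
    by_cases hc : PySem.Set.contains S (p.1 - 1, p.2 + 1) = true
    · rw [if_pos hc]
      have h1 : pvCB p 1 ∈ S := by
        have := (PySem.Set.contains_iff S _).mp hc
        simpa [pvCB] using this
      rcases pvOut_cases S fuel (p.1 - 1, p.2 + 1) with ⟨m, hm, heq, hpath, hstop⟩ | hall
      · left
        refine ⟨m + 1, by omega, by rw [heq, pvCB_shift], ?_, ?_⟩
        · intro t h1t htm
          rcases Nat.exists_eq_add_of_le h1t with ⟨k, rfl⟩
          rcases Nat.eq_zero_or_pos k with rfl | hk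
          · simpa using h1
          · have := hpath k (by omega) (by omega)
            rw [pvCB_shift] at this
            rwa [Nat.add_comm 1 k]
        · rw [← pvCB_shift]; exact hstop
      · right
        intro t h1t htf
        rcases Nat.exists_eq_add_of_le h1t with ⟨k, rfl⟩
        rcases Nat.eq_zero_or_pos k with rfl | hk
        · simpa using h1
        · have := hall k (by omega) (by omega)
          rw [pvCB_shift] at this
          rwa [Nat.add_comm 1 k]
    · rw [if_neg hc]
      left
      refine ⟨0, by omega, (pvCB_zero p).symm, by omega, ?_⟩
      intro hmem
      exact (pvContains_false_iff S _).mp (Bool.eq_false_iff.mpr hc)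
        (by simpa [pvCB] using hmem)

lemma pvInw_spec (S : PySem.Set (Int × Int)) (hS : S.Nodup) (p : Int × Int) :
    ∃ m : Nat, pvInw S (S.length + 1) p = pvCF p m ∧
      (∀ t, 1 ≤ t → t ≤ m → pvCF p t ∈ S) ∧ pvCF p (m + 1) ∉ S := by
  rcases pvInw_cases S (S.length + 1) p with ⟨m, _, heq, hpath, hstop⟩ | hall
  · exact ⟨m, heq, hpath, hstop⟩
  · exfalso
    have := pvChain_count S hS (fun t => pvCF p (t + 1))
      (fun a b hab => by simp [pvCF] at hab; omega) (S.length + 1)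
      (fun t ht => hall (t + 1) (by omega) (by omega))
    omega

lemma pvOut_spec (S : PySem.Set (Int × Int)) (hS : S.Nodup) (p : Int × Int) :
    ∃ m : Nat, pvOut S (S.length + 1) p = pvCB p m ∧
      (∀ t, 1 ≤ t → t ≤ m → pvCB p t ∈ S) ∧ pvCB p (m + 1) ∉ S := by
  rcases pvOut_cases S (S.length + 1) p with ⟨m, _, heq, hpath, hstop⟩ | hall
  · exact ⟨m, heq, hpath, hstop⟩
  · exfalso
    have := pvChain_count S hS (fun t => pvCB p (t + 1))
      (fun a b hab => by simp [pvCB] at hab; omega) (S.length + 1)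
      (fun t ht => hall (t + 1) (by omega) (by omega))
    omega

-- any pair that is not a head is an inward-chain member of a head already in S
lemma pvHead_exists (S : PySem.Set (Int × Int)) (hS : S.Nodup) (p : Int × Int)
    (hpS : p ∈ S) (hnh : pvHd S p = false) :
    ∃ h k, 1 ≤ k ∧ h ∈ S ∧ pvHd S h = true ∧ p = pvCF h k ∧
      (∀ t, 1 ≤ t → t ≤ k → pvCF h t ∈ S) := by
  obtain ⟨m, _, hpath, hstop⟩ := pvOut_spec S hS p
  have hb : pvCB p 1 ∈ S := by
    simp [pvHd] at hnh
    rw [pvCB_one]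
    exact hnh
  have hm1 : 1 ≤ m := by
    rcases Nat.eq_zero_or_pos m with rfl | h
    · exact absurd (by simpa using hb) (by simpa using hstop)
    · exact h
  refine ⟨pvCB p m, m, hm1, hpath m hm1 le_rfl, ?_, (pvCF_pvCB p m).symm, ?_⟩
  · simp only [pvHd, Bool.not_eq_true']
    rw [pvCB_back]
    exact (pvContains_false_iff S _).mpr hstop
  · intro t h1t htm
    rw [pvCF_pvCB_sub p m t htm]
    rcases Nat.eq_zero_or_pos (m - t) with he | hpos
    · rw [he, pvCB_zero]; exact hpS
    · exact hpath (m - t) hpos (by omega)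

lemma pvStem_iff (S : PySem.Set (Int × Int)) (p : Int × Int) (m : Nat)
    (hpath : ∀ t, 1 ≤ t → t ≤ m → pvCF p t ∈ S) (hstop : pvCF p (m + 1) ∉ S) (q : Int × Int) :
    pvStem S p q ↔ ∃ k : Nat, k ≤ m ∧ q = pvCF p k := by
  constructor
  · rintro ⟨k, hq, hp⟩
    refine ⟨k, ?_, hq⟩
    by_contra hk
    exact hstop (hp (m + 1) (by omega) (by omega))
  · rintro ⟨k, hk, hq⟩
    exact ⟨k, hq, fun t h1 h2 => hpath t h1 (le_trans h2 hk)⟩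

lemma pvRange_mem_iff (p : Int × Int) (m : Nat) (q : Int × Int) :
    (∃ t, t ∈ PySem.List.pyRange 0 ((m : Int) + 1) 1 ∧ q = (p.1 + t, p.2 - t)) ↔
      ∃ k : Nat, k ≤ m ∧ q = pvCF p k := by
  constructor
  · rintro ⟨t, ht, rfl⟩
    rw [PySem.List.mem_pyRange_one] at ht
    refine ⟨t.toNat, by omega, ?_⟩
    simp [pvCF, Prod.ext_iff]; omega
  · rintro ⟨k, hk, rfl⟩
    refine ⟨(k : Int), ?_, rfl⟩
    rw [PySem.List.mem_pyRange_one]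
    exact ⟨by omega, by omega⟩

-- the main loop invariant: the accumulated `used` set is exactly the union of the
-- stems of the heads among the already-processed prefix P
lemma pvFoldA (S : PySem.Set (Int × Int)) (hS : S.Nodup) :
    ∀ (L' P : List (Int × Int)) (used : PySem.Set (Int × Int))
      (stems : List (Int × Int × Int × Int)),
      (P ++ L').Perm S → (P ++ L').Pairwise pvLexLt →
      (∀ q, q ∈ used ↔ ∃ h ∈ P, pvHd S h = true ∧ pvStem S h q) →
      (L'.foldl (pvStepA S) (used, stems)).2 = stems ++ (L'.filter (pvHd S)).map (pvStemFn S)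
  | [], P, used, stems, _, _, _ => by simp
  | p :: rest, P, used, stems, hperm, hpw, hinv => by
    have hre : (P ++ [p]) ++ rest = P ++ p :: rest := by simp
    have hpS : p ∈ S := hperm.subset (by simp)
    by_cases hh : pvHd S p = true
    · -- head: not yet used, outward walk is trivial, emit the stem
      have hnotused : p ∉ used := by
        intro hu
        obtain ⟨h, hP, hhd, k, hqk, hpath⟩ := (hinv p).mp hu
        rcases Nat.eq_zero_or_pos k with rfl | hk
        · rw [pvCF_zero] at hqk; subst hqk
          exact pvLexLt_irrefl p ((List.pairwise_append.mp hpw).2.2 p hP p (by simp))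
        · have hbS : (p.1 - 1, p.2 + 1) ∈ S := by
            rw [hqk, pvCF_back h k hk]
            rcases Nat.eq_zero_or_pos (k - 1) with he | hpos
            · rw [he, pvCF_zero]; exact hperm.subset (by simp [hP])
            · exact hpath (k - 1) hpos (by omega)
          simp [pvHd] at hh
          exact hh hbS
      have hcb : PySem.Set.contains S (p.1 - 1, p.2 + 1) = false := by
        simpa [pvHd] using hh
      have hout : pvOut S (S.length + 1) p = p := by
        rw [pvOut_succ, if_neg (by rw [hcb]; exact Bool.false_ne_true)]
      obtain ⟨m, hm, hmpath, hmstop⟩ := pvInw_spec S hS p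
      have he1 : (pvInw S (S.length + 1) p).1 - p.1 + 1 = (m : Int) + 1 := by
        rw [hm]; simp [pvCF]
      rw [List.foldl_cons]
      have hstep : pvStepA S (used, stems) p =
          ((PySem.List.pyRange 0 ((m : Int) + 1) 1).foldl
              (fun u t => PySem.Set.add u (p.1 + t, p.2 - t)) used,
            stems ++ [pvStemFn S p]) := by
        simp only [pvStepA, (pvContains_false_iff used p).mpr hnotused, Bool.false_eq_true,
          if_false, hout, he1, pvStemFn]
      rw [hstep]
      rw [pvFoldA S hS rest (P ++ [p]) _ (stems ++ [pvStemFn S p])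
        (by rwa [hre]) (by rwa [hre]) ?_]
      · rw [List.filter_cons_of_pos hh, List.map_cons]; simp
      · intro q
        rw [PySem.Set.mem_foldl_add]
        constructor
        · rintro (hq | ⟨t, ht, rfl⟩)
          · obtain ⟨h, hP, hhd, hst⟩ := (hinv q).mp hq
            exact ⟨h, by simp [hP], hhd, hst⟩
          · refine ⟨p, by simp, hh, ?_⟩
            rw [pvStem_iff S p m hmpath hmstop]
            exact (pvRange_mem_iff p m _).mp ⟨t, ht, rfl⟩
        · rintro ⟨h, hP, hhd, hst⟩
          rcases List.mem_append.mp hP with hP' | hP'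
          · exact Or.inl ((hinv q).mpr ⟨h, hP', hhd, hst⟩)
          · right
            rw [List.mem_singleton] at hP'; subst hP'
            obtain ⟨t, ht, hq⟩ := (pvRange_mem_iff h m q).mpr
              ((pvStem_iff S h m hmpath hmstop q).mp hst)
            exact ⟨t, ht, hq⟩
    · -- not a head: already used, skipped by A and filtered out by B
      have hnh : pvHd S p = false := Bool.eq_false_iff.mpr hh
      obtain ⟨h, k, hk1, hhS, hhd, hpk, hpath⟩ := pvHead_exists S hS p hpS hnh
      have hhP : h ∈ P := by
        have hmem : h ∈ P ++ p :: rest := hperm.symm.subset hhS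
        have hlt : pvLexLt h p := by
          have h1 : p.1 = h.1 + (k : Int) := by
            have := congrArg Prod.fst hpk; simpa [pvCF] using this
          left; omega
        rcases List.mem_append.mp hmem with hP' | hP'
        · exact hP'
        · exfalso
          rcases List.mem_cons.mp hP' with rfl | hP''
          · exact pvLexLt_irrefl h hlt
          · have := (List.pairwise_cons.mp (List.pairwise_append.mp hpw).2.1).1 h hP''
            exact pvLexLt_asymm this hlt
      have hused : p ∈ used := (hinv p).mpr ⟨h, hhP, hhd, k, hpk, hpath⟩
      rw [List.foldl_cons]
      have hstep : pvStepA S (used, stems) p = (used, stems) := by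
        simp [pvStepA, hused]
      rw [hstep]
      rw [pvFoldA S hS rest (P ++ [p]) used stems (by rwa [hre]) (by rwa [hre]) ?_]
      · rw [List.filter_cons_of_neg (by simp [hnh])]
      · intro q
        rw [hinv q]
        constructor
        · rintro ⟨h', hP', hhd', hst'⟩
          exact ⟨h', by simp [hP'], hhd', hst'⟩
        · rintro ⟨h', hP', hhd', hst'⟩
          rcases List.mem_append.mp hP' with hP'' | hP''
          · exact ⟨h', hP'', hhd', hst'⟩
          · rw [List.mem_singleton] at hP''; subst hP''
            rw [hhd'] at hnh; cases hnh

-- ===== VERDICT (by name: the statement is the Claim_ definition above) =====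
theorem pairs_to_stems_spec : Claim_equal_pairs_to_stems := by
  intro sp _
  unfold Spec_pairs_to_stems pairs_to_stems pairs_to_stems_alt
  have hS : (PySem.Set.ofList sp).Nodup := PySem.Set.nodup_ofList sp
  have hLperm : (PySem.List.sorted2 (PySem.Set.ofList sp) (fun p => p.1) (fun p => p.2)).Perm
      (PySem.Set.ofList sp) := PySem.List.sorted2_perm _ _ _ false
  have hpwlt : (PySem.List.sorted2 (PySem.Set.ofList sp) (fun p => p.1) (fun p => p.2)).Pairwise
      pvLexLt :=
    pvPairwise_lt_of_le_nodup _ (pvPw_sorted2 _) (hLperm.nodup_iff.mpr hS)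
  have hA := pvFoldA (PySem.Set.ofList sp) hS
    (PySem.List.sorted2 (PySem.Set.ofList sp) (fun p => p.1) (fun p => p.2)) []
    (PySem.Set.empty : PySem.Set (Int × Int)) []
    (by simpa using hLperm) (by simpa using hpwlt)
    (by intro q; simp [PySem.Set.empty])
  have hfilt : PySem.List.sorted2
      ((PySem.Set.ofList sp).filter
        (fun p => !(PySem.Set.contains (PySem.Set.ofList sp) (p.1 - 1, p.2 + 1))))
      (fun p => p.1) (fun p => p.2) =
      (PySem.List.sorted2 (PySem.Set.ofList sp) (fun p => p.1) (fun p => p.2)).filter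
        (pvHd (PySem.Set.ofList sp)) :=
    pvSorted2_eq _ _ (hLperm.filter _) (hpwlt.filter _)
  show (List.foldl (pvStepA (PySem.Set.ofList sp)) ((PySem.Set.empty : PySem.Set (Int × Int)), [])
      (PySem.List.sorted2 (PySem.Set.ofList sp) (fun p => p.1) (fun p => p.2))).2 = _
  rw [hA]
  show _ = (PySem.List.sorted2
      ((PySem.Set.ofList sp).filter
        (fun p => !(PySem.Set.contains (PySem.Set.ofList sp) (p.1 - 1, p.2 + 1))))
      (fun p => p.1) (fun p => p.2)).map (pvStemFn (PySem.Set.ofList sp))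
  rw [hfilt]
  rfl
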